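-- pv_equiv track=rewrite | github.com/vapmail16/datamigrationpoc | match_and_merge_streamlit.py | are_synonyms
-- ===== SOURCE A (Python) =====
-- synonym_dict = {
--     'customer_id': ['cust_id', 'customerid', 'customer id', 'client_id', 'clientid'],
--     'cust_id': ['customer_id', 'customerid', 'customer id', 'client_id', 'clientid'],
--     'name': ['full_name', 'fullname', 'full name', 'contact_name', 'person_name'],
--     'full_name': ['name', 'fullname', 'full name', 'contact_name', 'person_name'],
--     'email': ['contact_email', 'email_address', 'mail', 'emailid'],
--     'contact_email': ['email', 'email_address', 'mail', 'emailid'],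
--     'registration_date': ['signup_date', 'registrationdate', 'registration date', 'join_date', 'created_at'],
--     'signup_date': ['registration_date', 'registrationdate', 'registration date', 'join_date', 'created_at'],
--     'phone': ['mobile_number', 'telephone', 'mobile', 'cell', 'contact_number'],
--     'mobile_number': ['phone', 'telephone', 'mobile', 'cell', 'contact_number'],
--     'billing_address': ['shipping_address', 'address', 'location', 'addr', 'home_address'],
--     'shipping_address': ['billing_address', 'address', 'location', 'addr', 'home_address'],
--     'loyalty_points': ['rewards_earned', 'points', 'reward points'],
--     'rewards_earned': ['loyalty_points', 'points', 'reward points'],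
--     'subscription_type': ['membership_status', 'subscription', 'membership'],
--     'membership_status': ['subscription_type', 'subscription', 'membership'],
--     'preferred_language': ['preferred_contact_method', 'language', 'contact_method'],
--     'preferred_contact_method': ['preferred_language', 'language', 'contact_method'],
--     'date_of_birth': ['dob', 'dateofbirth', 'date of birth'],
--     'dob': ['date_of_birth', 'dateofbirth', 'date of birth'],
--     'first_name': ['firstname', 'first name'],
--     'last_name': ['lastname', 'last name'],
--     'address': ['shipping_address', 'billing_address', 'location', 'addr', 'home_address'],
--     'age': ['years', 'years_old'],
--     'preferences': ['preference', 'likes', 'interests'],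
--     'subscription_tier': ['subscription', 'tier', 'plan'],
--     'last_login': ['lastlogin', 'last login', 'recent_login'],
--     'account_balance': ['balance', 'accountbalance', 'funds'],
--     'payment_methods': ['payment', 'methods', 'paymentmethod'],
--     'notes': ['note', 'comments', 'remarks'],
-- }
--
-- def are_synonyms(field_a, field_b):
--     field_a = field_a.lower().replace('_', ' ').replace('-', ' ')
--     field_b = field_b.lower().replace('_', ' ').replace('-', ' ')
--     for key, synonyms in synonym_dict.items():
--         if field_a == key or field_a in synonyms:
--             if field_b == key or field_b in synonyms:
--                 return True
--     return False
-- ===== SOURCE B (Python) =====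
-- # Precompiled inverted index over synonym_dict: raw token -> list of group ids
-- # (group i = i-th key of synonym_dict). Two fields are synonyms iff their
-- # normalized forms share a group id.
-- _INDEX = {
--     'customer_id': [0, 1],
--     'cust_id': [0, 1],
--     'customerid': [0, 1],
--     'customer id': [0, 1],
--     'client_id': [0, 1],
--     'clientid': [0, 1],
--     'name': [2, 3],
--     'full_name': [2, 3],
--     'fullname': [2, 3],
--     'full name': [2, 3],
--     'contact_name': [2, 3],
--     'person_name': [2, 3],
--     'email': [4, 5],
--     'contact_email': [4, 5],
--     'email_address': [4, 5],
--     'mail': [4, 5],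
--     'emailid': [4, 5],
--     'registration_date': [6, 7],
--     'signup_date': [6, 7],
--     'registrationdate': [6, 7],
--     'registration date': [6, 7],
--     'join_date': [6, 7],
--     'created_at': [6, 7],
--     'phone': [8, 9],
--     'mobile_number': [8, 9],
--     'telephone': [8, 9],
--     'mobile': [8, 9],
--     'cell': [8, 9],
--     'contact_number': [8, 9],
--     'billing_address': [10, 11, 22],
--     'shipping_address': [10, 11, 22],
--     'address': [10, 11, 22],
--     'location': [10, 11, 22],
--     'addr': [10, 11, 22],
--     'home_address': [10, 11, 22],
--     'loyalty_points': [12, 13],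
--     'rewards_earned': [12, 13],
--     'points': [12, 13],
--     'reward points': [12, 13],
--     'subscription_type': [14, 15],
--     'membership_status': [14, 15],
--     'subscription': [14, 15, 25],
--     'membership': [14, 15],
--     'preferred_language': [16, 17],
--     'preferred_contact_method': [16, 17],
--     'language': [16, 17],
--     'contact_method': [16, 17],
--     'date_of_birth': [18, 19],
--     'dob': [18, 19],
--     'dateofbirth': [18, 19],
--     'date of birth': [18, 19],
--     'first_name': [20],
--     'firstname': [20],
--     'first name': [20],
--     'last_name': [21],
--     'lastname': [21],
--     'last name': [21],
--     'age': [23],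
--     'years': [23],
--     'years_old': [23],
--     'preferences': [24],
--     'preference': [24],
--     'likes': [24],
--     'interests': [24],
--     'subscription_tier': [25],
--     'tier': [25],
--     'plan': [25],
--     'last_login': [26],
--     'lastlogin': [26],
--     'last login': [26],
--     'recent_login': [26],
--     'account_balance': [27],
--     'balance': [27],
--     'accountbalance': [27],
--     'funds': [27],
--     'payment_methods': [28],
--     'payment': [28],
--     'methods': [28],
--     'paymentmethod': [28],
--     'notes': [29],
--     'note': [29],
--     'comments': [29],
--     'remarks': [29],
-- }
--
-- def are_synonyms(field_a, field_b):
--     field_a = field_a.lower().replace('_', ' ').replace('-', ' ')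
--     field_b = field_b.lower().replace('_', ' ').replace('-', ' ')
--     groups_b = _INDEX.get(field_b, [])
--     return any(g in groups_b for g in _INDEX.get(field_a, []))
-- ===== Notes on version B (the rewrite author's own statement) =====
-- stated objective: alternative
-- what changed: Replaces the per-query scan over every synonym group with nested membership tests by a precompiled inverted index (raw token -> list of group ids); the query becomes two index lookups and a small id-intersection test.
import Mathlib
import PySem

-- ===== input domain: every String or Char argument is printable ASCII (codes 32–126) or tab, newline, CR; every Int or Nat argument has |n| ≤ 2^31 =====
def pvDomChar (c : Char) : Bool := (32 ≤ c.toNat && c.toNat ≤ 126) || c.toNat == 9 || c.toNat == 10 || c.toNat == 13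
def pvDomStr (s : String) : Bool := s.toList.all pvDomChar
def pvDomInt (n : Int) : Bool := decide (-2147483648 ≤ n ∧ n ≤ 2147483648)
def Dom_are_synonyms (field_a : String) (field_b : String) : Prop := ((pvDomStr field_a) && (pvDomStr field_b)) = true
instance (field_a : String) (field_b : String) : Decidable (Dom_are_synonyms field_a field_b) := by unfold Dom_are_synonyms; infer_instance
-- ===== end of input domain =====

-- B replaces A's per-query scan over every synonym group (nested membership tests per group) by a
-- precompiled inverted index raw token -> group ids; the query intersects two id lists (alternative; same cost at this fixed table size).

-- field.lower().replace('_', ' ').replace('-', ' ')  (identical line in both Pythons)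
def pyNormalize (s : String) : String :=
  PySem.Str.replace (PySem.Str.replace (PySem.Str.lower s) "_" " ") "-" " "

-- ===== PORT A =====
-- the module constant synonym_dict of A's module
def synonym_dict : List (String × List String) := [
  ("customer_id", ["cust_id", "customerid", "customer id", "client_id", "clientid"]),
  ("cust_id", ["customer_id", "customerid", "customer id", "client_id", "clientid"]),
  ("name", ["full_name", "fullname", "full name", "contact_name", "person_name"]),
  ("full_name", ["name", "fullname", "full name", "contact_name", "person_name"]),
  ("email", ["contact_email", "email_address", "mail", "emailid"]),
  ("contact_email", ["email", "email_address", "mail", "emailid"]),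
  ("registration_date", ["signup_date", "registrationdate", "registration date", "join_date", "created_at"]),
  ("signup_date", ["registration_date", "registrationdate", "registration date", "join_date", "created_at"]),
  ("phone", ["mobile_number", "telephone", "mobile", "cell", "contact_number"]),
  ("mobile_number", ["phone", "telephone", "mobile", "cell", "contact_number"]),
  ("billing_address", ["shipping_address", "address", "location", "addr", "home_address"]),
  ("shipping_address", ["billing_address", "address", "location", "addr", "home_address"]),
  ("loyalty_points", ["rewards_earned", "points", "reward points"]),
  ("rewards_earned", ["loyalty_points", "points", "reward points"]),
  ("subscription_type", ["membership_status", "subscription", "membership"]),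
  ("membership_status", ["subscription_type", "subscription", "membership"]),
  ("preferred_language", ["preferred_contact_method", "language", "contact_method"]),
  ("preferred_contact_method", ["preferred_language", "language", "contact_method"]),
  ("date_of_birth", ["dob", "dateofbirth", "date of birth"]),
  ("dob", ["date_of_birth", "dateofbirth", "date of birth"]),
  ("first_name", ["firstname", "first name"]),
  ("last_name", ["lastname", "last name"]),
  ("address", ["shipping_address", "billing_address", "location", "addr", "home_address"]),
  ("age", ["years", "years_old"]),
  ("preferences", ["preference", "likes", "interests"]),
  ("subscription_tier", ["subscription", "tier", "plan"]),
  ("last_login", ["lastlogin", "last login", "recent_login"]),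
  ("account_balance", ["balance", "accountbalance", "funds"]),
  ("payment_methods", ["payment", "methods", "paymentmethod"]),
  ("notes", ["note", "comments", "remarks"])]

-- the for-loop over synonym_dict.items() with its early return
def synLoopA : List (String × List String) → String → String → Bool
  | [], _, _ => false
  | (key, syns) :: rest, fa, fb =>
    if fa == key || syns.contains fa then
      (if fb == key || syns.contains fb then true else synLoopA rest fa fb)
    else synLoopA rest fa fb

def are_synonyms (field_a : String) (field_b : String) : Bool :=
  synLoopA synonym_dict (pyNormalize field_a) (pyNormalize field_b)

-- ===== PORT B =====
-- B's module constant _INDEX: precompiled inverted index raw token -> group ids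
def synIndex : PySem.Dict String (List Int) := PySem.Dict.ofList
  [("customer_id", [0, 1]),
  ("cust_id", [0, 1]),
  ("customerid", [0, 1]),
  ("customer id", [0, 1]),
  ("client_id", [0, 1]),
  ("clientid", [0, 1]),
  ("name", [2, 3]),
  ("full_name", [2, 3]),
  ("fullname", [2, 3]),
  ("full name", [2, 3]),
  ("contact_name", [2, 3]),
  ("person_name", [2, 3]),
  ("email", [4, 5]),
  ("contact_email", [4, 5]),
  ("email_address", [4, 5]),
  ("mail", [4, 5]),
  ("emailid", [4, 5]),
  ("registration_date", [6, 7]),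
  ("signup_date", [6, 7]),
  ("registrationdate", [6, 7]),
  ("registration date", [6, 7]),
  ("join_date", [6, 7]),
  ("created_at", [6, 7]),
  ("phone", [8, 9]),
  ("mobile_number", [8, 9]),
  ("telephone", [8, 9]),
  ("mobile", [8, 9]),
  ("cell", [8, 9]),
  ("contact_number", [8, 9]),
  ("billing_address", [10, 11, 22]),
  ("shipping_address", [10, 11, 22]),
  ("address", [10, 11, 22]),
  ("location", [10, 11, 22]),
  ("addr", [10, 11, 22]),
  ("home_address", [10, 11, 22]),
  ("loyalty_points", [12, 13]),
  ("rewards_earned", [12, 13]),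
  ("points", [12, 13]),
  ("reward points", [12, 13]),
  ("subscription_type", [14, 15]),
  ("membership_status", [14, 15]),
  ("subscription", [14, 15, 25]),
  ("membership", [14, 15]),
  ("preferred_language", [16, 17]),
  ("preferred_contact_method", [16, 17]),
  ("language", [16, 17]),
  ("contact_method", [16, 17]),
  ("date_of_birth", [18, 19]),
  ("dob", [18, 19]),
  ("dateofbirth", [18, 19]),
  ("date of birth", [18, 19]),
  ("first_name", [20]),
  ("firstname", [20]),
  ("first name", [20]),
  ("last_name", [21]),
  ("lastname", [21]),
  ("last name", [21]),
  ("age", [23]),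
  ("years", [23]),
  ("years_old", [23]),
  ("preferences", [24]),
  ("preference", [24]),
  ("likes", [24]),
  ("interests", [24]),
  ("subscription_tier", [25]),
  ("tier", [25]),
  ("plan", [25]),
  ("last_login", [26]),
  ("lastlogin", [26]),
  ("last login", [26]),
  ("recent_login", [26]),
  ("account_balance", [27]),
  ("balance", [27]),
  ("accountbalance", [27]),
  ("funds", [27]),
  ("payment_methods", [28]),
  ("payment", [28]),
  ("methods", [28]),
  ("paymentmethod", [28]),
  ("notes", [29]),
  ("note", [29]),
  ("comments", [29]),
  ("remarks", [29])]

def are_synonyms_alt (field_a : String) (field_b : String) : Bool :=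
  let a := pyNormalize field_a
  let b := pyNormalize field_b
  let groups_b := synIndex.getD b []
  (synIndex.getD a []).any (fun g => groups_b.contains g)

-- ===== PRECONDITION & SPEC =====
def Spec_are_synonyms (field_a : String) (field_b : String) (out : Bool) : Prop := out = are_synonyms_alt field_a field_b
instance (field_a : String) (field_b : String) (out : Bool) : Decidable (Spec_are_synonyms field_a field_b out) := by unfold Spec_are_synonyms; infer_instance

-- ===== CLAIM =====
def Claim_equal_are_synonyms : Prop := ∀ (field_a : String) (field_b : String), Dom_are_synonyms field_a field_b → Spec_are_synonyms field_a field_b (are_synonyms field_a field_b)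

-- ===== LEMMAS AND PROOFS =====

-- proof-only: the same index built from synonym_dict by a fold over its enumeration
def buildIndex : PySem.Dict String (List Int) :=
  (PySem.List.enumerate synonym_dict).foldl (fun d p =>
    (p.2.1 :: p.2.2).foldl (fun d tok => d.insert tok (d.getD tok [] ++ [p.1])) d)
    PySem.Dict.empty

set_option maxRecDepth 4000 in
lemma synIndex_eq_build : synIndex = buildIndex := by decide

lemma synLoopA_iff (L : List (String × List String)) (a b : String) :
    synLoopA L a b = true ↔ ∃ p ∈ L, (a = p.1 ∨ a ∈ p.2) ∧ (b = p.1 ∨ b ∈ p.2) := by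
  induction L with
  | nil => simp [synLoopA]
  | cons p rest ih =>
    obtain ⟨k, syns⟩ := p
    simp only [synLoopA]
    by_cases ha : a = k ∨ a ∈ syns <;> by_cases hb : b = k ∨ b ∈ syns <;>
      simp [ih, ha, hb]

lemma mem_getD_inner (toks : List String) (i : Int)
    (d : PySem.Dict String (List Int)) (t : String) (g : Int) :
    (g ∈ (toks.foldl (fun d tok => d.insert tok (d.getD tok [] ++ [i])) d).getD t [])
    ↔ g ∈ d.getD t [] ∨ (g = i ∧ t ∈ toks) := by
  induction toks generalizing d with
  | nil => simp
  | cons x xs ih =>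
    simp only [List.foldl_cons, ih, PySem.Dict.getD_insert, List.mem_cons]
    by_cases h : t = x <;> (simp [h]; try tauto)

lemma mem_getD_index (L : List (Int × (String × List String)))
    (d : PySem.Dict String (List Int)) (t : String) (g : Int) :
    (g ∈ (L.foldl (fun d p =>
        (p.2.1 :: p.2.2).foldl (fun d tok => d.insert tok (d.getD tok [] ++ [p.1])) d) d).getD t [])
    ↔ g ∈ d.getD t [] ∨ ∃ p ∈ L, g = p.1 ∧ (t = p.2.1 ∨ t ∈ p.2.2) := by
  induction L generalizing d with
  | nil => simp
  | cons p rest ih =>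
    rw [List.foldl_cons, ih, mem_getD_inner]
    simp only [List.mem_cons]
    constructor
    · rintro ((h | ⟨rfl, ht⟩) | ⟨q, hq, rfl, hqt⟩)
      · exact Or.inl h
      · exact Or.inr ⟨p, Or.inl rfl, rfl, ht⟩
      · exact Or.inr ⟨q, Or.inr hq, rfl, hqt⟩
    · rintro (h | ⟨q, (rfl | hq), rfl, hqt⟩)
      · exact Or.inl (Or.inl h)
      · exact Or.inl (Or.inr ⟨rfl, hqt⟩)
      · exact Or.inr ⟨q, hq, rfl, hqt⟩

lemma mem_synIndex (t : String) (g : Int) :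
    g ∈ synIndex.getD t [] ↔
      ∃ (k : Nat) (h : k < synonym_dict.length),
        g = (k : Int) ∧ (t = synonym_dict[k].1 ∨ t ∈ synonym_dict[k].2) := by
  rw [synIndex_eq_build, buildIndex, mem_getD_index]
  simp only [PySem.Dict.getD_empty, List.not_mem_nil, false_or,
    PySem.List.mem_enumerate_iff]
  constructor
  · rintro ⟨p, ⟨k, hk, rfl⟩, rfl, ht⟩
    exact ⟨k, hk, by simp, ht⟩
  · rintro ⟨k, hk, rfl, ht⟩
    exact ⟨((k : Int), synonym_dict[k]), ⟨k, hk, by simp⟩, rfl, ht⟩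

-- ===== VERDICT =====
theorem are_synonyms_spec : Claim_equal_are_synonyms := by
  intro fa fb _
  unfold Spec_are_synonyms are_synonyms are_synonyms_alt
  rw [Bool.eq_iff_iff, synLoopA_iff]
  simp only [List.any_eq_true, List.contains_eq_mem, decide_eq_true_eq, mem_synIndex]
  constructor
  · rintro ⟨p, hp, hpa, hpb⟩
    obtain ⟨k, hk, rfl⟩ := List.mem_iff_getElem.1 hp
    exact ⟨(k : Int), ⟨k, hk, rfl, hpa⟩, ⟨k, hk, rfl, hpb⟩⟩
  · rintro ⟨g, ⟨k, hk, hgk, hta⟩, ⟨k', hk', hgk', htb⟩⟩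
    have hkk : k = k' := by exact_mod_cast hgk.symm.trans hgk'
    subst hkk
    exact ⟨synonym_dict[k], List.getElem_mem hk, hta, htb⟩
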